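-- pv_equiv track=rewrite | github.com/Ren-97/CodePath2025Summer | Unit2/section1_advanced1.py | counting_pirates_action_minutes
-- ===== SOURCE A (Python) =====
-- from collections import defaultdict
--
-- def counting_pirates_action_minutes(logs, k):
--     ans = [0] * k
--     dict_ = defaultdict(set)
--     for id, min in logs:
--         dict_[id].add(min)
--
--     for id, min in dict_.items():
--         n = len(min)
--         if 1 <= n <= k:
--             ans[n-1] += 1
--     return ans
-- ===== SOURCE B (Python) =====
-- def counting_pirates_action_minutes(logs, k):
--     # sort a copy by (id, minute); one sweep over contiguous id-runs,
--     # counting distinct minutes by comparing with the previous entry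
--     ans = [0] * k
--     s = sorted(logs)
--     i = 0
--     while i < len(s):
--         pid, prev = s[i]
--         n = 1
--         i += 1
--         while i < len(s) and s[i][0] == pid:
--             if s[i][1] != prev:
--                 n += 1
--                 prev = s[i][1]
--             i += 1
--         if 1 <= n <= k:
--             ans[n - 1] += 1
--     return ans
-- ===== Notes on version B (the rewrite author's own statement) =====
-- stated objective: alternative
-- what changed: Replaces A's defaultdict-of-sets grouping by sorting a copy of the logs by (id, minute) and sweeping the sorted list once, counting distinct minutes per contiguous id-run by comparing each entry with the previous one; no hash-based structure is used.
import Mathlib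
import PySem

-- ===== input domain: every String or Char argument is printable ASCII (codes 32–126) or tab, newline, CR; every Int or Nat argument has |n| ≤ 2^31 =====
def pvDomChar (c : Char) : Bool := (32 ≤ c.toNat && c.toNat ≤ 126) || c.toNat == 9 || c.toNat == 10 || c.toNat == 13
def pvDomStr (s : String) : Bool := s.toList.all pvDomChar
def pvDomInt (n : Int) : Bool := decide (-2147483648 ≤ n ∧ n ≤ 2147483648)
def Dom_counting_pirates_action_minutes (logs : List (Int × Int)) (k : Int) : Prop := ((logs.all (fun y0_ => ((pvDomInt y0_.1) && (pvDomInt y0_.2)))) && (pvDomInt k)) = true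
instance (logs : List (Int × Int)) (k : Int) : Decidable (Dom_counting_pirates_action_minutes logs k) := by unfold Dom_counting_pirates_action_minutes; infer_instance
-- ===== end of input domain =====

-- B replaces A's defaultdict-of-sets by sorting a copy of the logs by (id, minute) and
-- sweeping the sorted list once, counting distinct minutes inside each contiguous id-run
-- (alternative algorithm of similar cost; no hash structures).

-- ===== PORT A =====
-- the shared body of 'if 1 <= n <= k: ans[n-1] += 1' (same line in both Pythons)
def pvBump (k : Int) (ans : List Int) (n : Int) : List Int :=
  if 1 ≤ n ∧ n ≤ k then PySem.List.pySetD ans (n - 1) (PySem.List.pyGetD ans (n - 1) 0 + 1) else ans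

def counting_pirates_action_minutes (logs : List (Int × Int)) (k : Int) : List Int :=
  let ans := List.replicate k.toNat (0 : Int)
  let dict_ := logs.foldl
    (fun d p => d.modify p.1 PySem.Set.empty (fun s => PySem.Set.add s p.2))
    (PySem.Dict.empty : PySem.Dict Int (PySem.Set Int))
  dict_.items.foldl (fun ans it => pvBump k ans (PySem.Set.len it.2)) ans

-- ===== PORT B =====
-- the inner while loop: consume the rest of the run of id 'pid', counting minute changes
def pvRun (pid : Int) (prev : Int) (n : Int) : List (Int × Int) → Int × List (Int × Int)
  | [] => (n, [])
  | (i, m) :: rest =>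
    if i == pid then
      if m ≠ prev then pvRun pid m (n + 1) rest else pvRun pid prev n rest
    else (n, (i, m) :: rest)

theorem pvRun_len (pid prev n : Int) : ∀ s : List (Int × Int), (pvRun pid prev n s).2.length ≤ s.length := by
  intro s
  induction s generalizing prev n with
  | nil => simp [pvRun]
  | cons p rest ih =>
    obtain ⟨i, m⟩ := p
    simp only [pvRun]
    split
    · split
      · exact le_trans (ih _ _) (Nat.le_succ _)
      · exact le_trans (ih _ _) (Nat.le_succ _)
    · simp

-- the outer while loop over the sorted list
def pvSweep (k : Int) (ans : List Int) : List (Int × Int) → List Int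
  | [] => ans
  | (pid, m) :: rest =>
    pvSweep k (pvBump k ans (pvRun pid m 1 rest).1) (pvRun pid m 1 rest).2
termination_by s => s.length
decreasing_by exact Nat.lt_succ_of_le (pvRun_len pid m 1 rest)

def counting_pirates_action_minutes_alt (logs : List (Int × Int)) (k : Int) : List Int :=
  let ans := List.replicate k.toNat (0 : Int)
  let s := PySem.List.sorted2 logs Prod.fst Prod.snd
  pvSweep k ans s

-- ===== PRECONDITION & SPEC =====
def Spec_counting_pirates_action_minutes (logs : List (Int × Int)) (k : Int) (out : List Int) : Prop := out = counting_pirates_action_minutes_alt logs k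
instance (logs : List (Int × Int)) (k : Int) (out : List Int) : Decidable (Spec_counting_pirates_action_minutes logs k out) := by unfold Spec_counting_pirates_action_minutes; infer_instance

-- ===== CLAIM (what is proved, stated in full; the proofs are below) =====
def Claim_equal_counting_pirates_action_minutes : Prop := ∀ (logs : List (Int × Int)) (k : Int), Dom_counting_pirates_action_minutes logs k → Spec_counting_pirates_action_minutes logs k (counting_pirates_action_minutes logs k)

-- ===== LEMMAS AND PROOFS =====

-- the lexicographic order the sorted list satisfies
def pvLex (a b : Int × Int) : Prop := a.1 < b.1 ∨ (a.1 = b.1 ∧ a.2 ≤ b.2)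

theorem pvLex_trans {a b c : Int × Int} (h1 : pvLex a b) (h2 : pvLex b c) : pvLex a c := by
  unfold pvLex at *; omega

-- the per-id distinct-minute counts, ids in first-occurrence order
def pvNA (l : List (Int × Int)) : List Int :=
  (PySem.Set.ofList (l.map Prod.fst)).map
    (fun id => ((PySem.Set.ofList ((l.filter (fun p => p.1 == id)).map Prod.snd)).length : Int))

-- the sequence of run counts produced by the sweep
def pvRuns : List (Int × Int) → List Int
  | [] => []
  | (pid, m) :: rest => (pvRun pid m 1 rest).1 :: pvRuns (pvRun pid m 1 rest).2
termination_by s => s.length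
decreasing_by exact Nat.lt_succ_of_le (pvRun_len pid m 1 rest)

-- chain-change counter (closed form of pvRun's count)
def pvNewCnt (prev : Int) : List Int → Int
  | [] => 0
  | m :: t => if m ≠ prev then 1 + pvNewCnt m t else pvNewCnt prev t

theorem pvRun_spec (pid : Int) : ∀ (rest : List (Int × Int)) (prev n : Int),
    pvRun pid prev n rest
      = (n + pvNewCnt prev ((rest.takeWhile (fun p => p.1 == pid)).map Prod.snd),
         rest.dropWhile (fun p => p.1 == pid)) := by
  intro rest
  induction rest with
  | nil => intro prev n; simp [pvRun, pvNewCnt]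
  | cons p t ih =>
    intro prev n
    obtain ⟨i, m⟩ := p
    by_cases hi : (i == pid) = true
    · by_cases hm : m ≠ prev
      · simp only [pvRun, hi, if_pos hm, if_true, List.takeWhile_cons, List.dropWhile_cons, ih]
        simp [pvNewCnt, hm]
        omega
      · simp only [pvRun, hi, if_neg hm, if_true, List.takeWhile_cons, List.dropWhile_cons, ih]
        simp [pvNewCnt, hm]
    · simp [pvRun, hi, pvNewCnt]

theorem pvSweep_foldl (k : Int) : ∀ (s : List (Int × Int)) (ans : List Int),
    pvSweep k ans s = List.foldl (pvBump k) ans (pvRuns s) := by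
  intro s
  induction s using pvRuns.induct with
  | case1 => intro ans; simp [pvSweep, pvRuns]
  | case2 pid m rest ih =>
    intro ans
    rw [pvSweep, pvRuns, List.foldl_cons, ih]

-- |set(xs)| = |xs.dedup| (two nodup lists with the same members)
theorem pvLenOfList (xs : List Int) : (PySem.Set.ofList xs).length = xs.dedup.length := by
  refine List.Perm.length_eq ?_
  rw [List.perm_ext_iff_of_nodup (PySem.Set.nodup_ofList xs) xs.nodup_dedup]
  intro a
  rw [PySem.Set.mem_ofList, List.mem_dedup]

-- on a nondecreasing list, counting changes counts the distinct values
theorem pvChainCount : ∀ (ms : List Int) (prev : Int), ms.Pairwise (· ≤ ·) → (∀ x ∈ ms, prev ≤ x) →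
    (((prev :: ms).dedup.length : Int)) = 1 + pvNewCnt prev ms := by
  intro ms
  induction ms with
  | nil => intro prev _ _; simp [pvNewCnt]
  | cons m t ih =>
    intro prev hp hge
    by_cases hm : m ≠ prev
    · have hprevm : prev < m := lt_of_le_of_ne (hge m List.mem_cons_self) (Ne.symm hm)
      have hnot : prev ∉ m :: t := by
        intro hmem
        rcases List.mem_cons.mp hmem with h | h
        · exact hm h.symm
        · exact absurd (List.rel_of_pairwise_cons hp h) (by omega)
      rw [List.dedup_cons_of_notMem hnot,
        show pvNewCnt prev (m :: t) = 1 + pvNewCnt m t by simp [pvNewCnt, hm]]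
      have hIH := ih m hp.tail (fun x hx => List.rel_of_pairwise_cons hp hx)
      rw [List.length_cons]
      push_cast
      omega
    · rw [not_ne_iff] at hm
      subst hm
      rw [show (m :: m :: t).dedup = (m :: t).dedup from
        List.dedup_cons_of_mem List.mem_cons_self,
        show pvNewCnt m (m :: t) = pvNewCnt m t by simp [pvNewCnt]]
      exact ih m hp.tail (fun x hx => List.rel_of_pairwise_cons hp hx)

-- Set.update by elements not containing a: the head is preserved
theorem pvUpdate_cons_head (a : Int) : ∀ (l : List Int) (s : PySem.Set Int), a ∉ l →
    PySem.Set.update (a :: s) l = a :: PySem.Set.update s l := by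
  intro l
  induction l with
  | nil => intro s _; rfl
  | cons x t ih =>
    intro s hnot
    have hxa : x ≠ a := fun h => hnot (h ▸ List.mem_cons_self)
    rw [PySem.Set.update_cons, PySem.Set.update_cons]
    have : PySem.Set.add (a :: s) x = a :: PySem.Set.add s x := by
      by_cases hx : x ∈ s
      · rw [PySem.Set.add_of_mem hx, PySem.Set.add_of_mem (List.mem_cons_of_mem _ hx)]
      · rw [PySem.Set.add_of_not_mem hx,
          PySem.Set.add_of_not_mem (by simp [hxa, hx]), List.cons_append]
    rw [this, ih _ (fun h => hnot (List.mem_cons_of_mem _ h))]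

-- updating by elements already present is the identity
theorem pvUpdate_mem (pid : Int) : ∀ (l : List Int) (s : PySem.Set Int), pid ∈ s →
    (∀ i ∈ l, i = pid) → PySem.Set.update s l = s := by
  intro l
  induction l with
  | nil => intro s _ _; rfl
  | cons x t ih =>
    intro s hmem hall
    rw [PySem.Set.update_cons, PySem.Set.add_of_mem (by rw [hall x List.mem_cons_self]; exact hmem)]
    exact ih s hmem (fun i hi => hall i (List.mem_cons_of_mem _ hi))

theorem pvOfList_group (pid : Int) (l1 l2 : List Int) (h1 : ∀ i ∈ l1, i = pid) (h2 : pid ∉ l2) :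
    PySem.Set.ofList (pid :: (l1 ++ l2)) = pid :: PySem.Set.ofList l2 := by
  have e1 : PySem.Set.ofList (pid :: (l1 ++ l2)) = PySem.Set.update [pid] (l1 ++ l2) := by
    simp [PySem.Set.ofList, PySem.Set.update, PySem.Set.empty, PySem.Set.add]
  have e2 : PySem.Set.update ([pid] : PySem.Set Int) (l1 ++ l2)
      = PySem.Set.update (PySem.Set.update [pid] l1) l2 := by
    simp [PySem.Set.update, List.foldl_append]
  rw [e1, e2, pvUpdate_mem pid l1 [pid] (List.mem_cons_self) h1,
    pvUpdate_cons_head pid l2 [] h2, PySem.Set.update_nil_left]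

-- after the run of pid is dropped, pid never occurs again (needs sortedness)
theorem pvDropWhile_fst_ne (pid : Int) : ∀ (rest : List (Int × Int)), rest.Pairwise pvLex →
    (∀ p ∈ rest, pid ≤ p.1) → ∀ q ∈ rest.dropWhile (fun p => p.1 == pid), q.1 ≠ pid := by
  intro rest
  induction rest with
  | nil => intro _ _ q hq; simp [List.dropWhile] at hq
  | cons p t ih =>
    intro hp hle q hq
    obtain ⟨i, m⟩ := p
    by_cases hi : (i == pid) = true
    · rw [List.dropWhile_cons_of_pos (by simpa using hi)] at hq
      exact ih hp.tail (fun r hr => hle r (List.mem_cons_of_mem _ hr)) q hq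
    · rw [List.dropWhile_cons_of_neg (by simpa using hi)] at hq
      have hipid : i ≠ pid := by simpa using hi
      have hgt : pid < i := lt_of_le_of_ne (by simpa using hle (i, m) List.mem_cons_self) (Ne.symm hipid)
      rcases List.mem_cons.mp hq with h | h
      · rw [h]; exact fun hc => hipid (by simpa using hc)
      · have := List.rel_of_pairwise_cons hp h
        unfold pvLex at this
        omega

-- the strict lexicographic comparator sorted2 uses
def pvCmp (a b : Int × Int) : Bool :=
  decide (a.1 < b.1) || (!decide (b.1 < a.1) && decide (a.2 < b.2))

theorem pvInsertBy_cons (before : (Int × Int) → (Int × Int) → Bool) (x y : Int × Int)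
    (ys : List (Int × Int)) :
    PySem.List.insertBy before x (y :: ys)
      = if before x y then x :: y :: ys else y :: PySem.List.insertBy before x ys := by
  by_cases h : before x y <;> simp [PySem.List.insertBy, h]

theorem pvInsertBy_pairwise (x : Int × Int) :
    ∀ acc : List (Int × Int), acc.Pairwise pvLex →
    (PySem.List.insertBy pvCmp x acc).Pairwise pvLex := by
  intro acc
  induction acc with
  | nil => intro _; simp [PySem.List.insertBy, pvLex]
  | cons y ys ih =>
    intro hp
    rw [pvInsertBy_cons]
    by_cases hb : pvCmp x y = true
    · rw [if_pos hb]
      refine List.Pairwise.cons ?_ hp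
      intro z hz
      have hxy : pvLex x y := by unfold pvLex; simp [pvCmp] at hb; omega
      rcases List.mem_cons.mp hz with h | h
      · exact h ▸ hxy
      · exact pvLex_trans hxy (List.rel_of_pairwise_cons hp h)
    · rw [if_neg hb]
      refine List.Pairwise.cons ?_ (ih hp.tail)
      intro z hz
      rcases (PySem.List.mem_insertBy _ x z ys).mp hz with h | h
      · subst h
        unfold pvLex; simp [pvCmp] at hb; omega
      · exact List.rel_of_pairwise_cons hp h

theorem pvSorted2_pairwise (logs : List (Int × Int)) :
    (PySem.List.sorted2 logs Prod.fst Prod.snd).Pairwise pvLex := by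
  rw [show PySem.List.sorted2 logs Prod.fst Prod.snd
      = List.foldl (fun acc x => PySem.List.insertBy pvCmp x acc) [] logs from rfl]
  have : ∀ (l : List (Int × Int)) (acc : List (Int × Int)), acc.Pairwise pvLex →
      (List.foldl (fun acc x => PySem.List.insertBy pvCmp x acc) acc l).Pairwise pvLex := by
    intro l
    induction l with
    | nil => intro acc h; exact h
    | cons x t ih => intro acc h; exact ih _ (pvInsertBy_pairwise x acc h)
  exact this logs [] (by simp)

-- the main sweep characterisation: on a lex-sorted list the run counts are exactly pvNA
theorem pvRuns_eq_NA : ∀ s : List (Int × Int), s.Pairwise pvLex → pvRuns s = pvNA s := by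
  intro s
  induction s using pvRuns.induct with
  | case1 => intro _; simp [pvRuns, pvNA, PySem.Set.ofList, PySem.Set.empty]
  | case2 pid m rest ih =>
    intro hs
    have hle : ∀ p ∈ rest, pvLex (pid, m) p := fun p hp => List.rel_of_pairwise_cons hs hp
    have hle1 : ∀ p ∈ rest, pid ≤ p.1 := by
      intro p hp; have := hle p hp; unfold pvLex at this; simp at this; omega
    set grp := rest.takeWhile (fun p => p.1 == pid) with hgrp
    set rest' := rest.dropWhile (fun p => p.1 == pid) with hrest'
    have hsplit : grp ++ rest' = rest := List.takeWhile_append_dropWhile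
    have hgrpid : ∀ p ∈ grp, p.1 = pid := by
      intro p hp; simpa using List.mem_takeWhile_imp hp
    have hne : ∀ q ∈ rest', q.1 ≠ pid := pvDropWhile_fst_ne pid rest hs.tail hle1
    have hgrp_pl : grp.Pairwise pvLex := hs.tail.sublist (List.takeWhile_sublist _)
    have hrest'_pl : rest'.Pairwise pvLex := hs.tail.sublist (List.dropWhile_sublist _)
    have hgrp_mem : ∀ p ∈ grp, p ∈ rest := fun p hp => (List.takeWhile_sublist _).mem hp
    -- run result via the closed form
    rw [pvRun_spec] at ih
    dsimp only at ih
    rw [pvRuns, pvRun_spec]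
    dsimp only
    simp only [← hgrp, ← hrest'] at ih ⊢
    -- minutes of the run are nondecreasing and ≥ m
    have hmins_sorted : (grp.map Prod.snd).Pairwise (· ≤ ·) := by
      rw [List.pairwise_map]
      refine hgrp_pl.imp_of_mem ?_
      intro a b ha hb hab
      have := hgrpid a ha; have := hgrpid b hb
      unfold pvLex at hab; omega
    have hmins_ge : ∀ x ∈ grp.map Prod.snd, m ≤ x := by
      intro x hx
      obtain ⟨p, hp, hpx⟩ := List.mem_map.mp hx
      have := hle p (hgrp_mem p hp)
      have := hgrpid p hp
      unfold pvLex at *; omega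
    -- head count: |set(minutes of pid in s)| = 1 + newCnt
    have hfilter_pid : ((pid, m) :: rest).filter (fun p => p.1 == pid) = (pid, m) :: grp := by
      rw [List.filter_cons_of_pos (by simp), ← hsplit, List.filter_append,
        List.filter_eq_self.mpr (fun a ha => by simp [hgrpid a ha]),
        List.filter_eq_nil_iff.mpr (fun a ha => by simp [hne a ha]), List.append_nil]
    have hcnt : ((PySem.Set.ofList ((((pid, m) :: rest).filter (fun p => p.1 == pid)).map Prod.snd)).length : Int)
        = 1 + pvNewCnt m (grp.map Prod.snd) := by
      rw [hfilter_pid, List.map_cons, pvLenOfList]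
      exact pvChainCount (grp.map Prod.snd) m hmins_sorted hmins_ge
    -- id list decomposition
    have hids : PySem.Set.ofList (((pid, m) :: rest).map Prod.fst)
        = pid :: PySem.Set.ofList (rest'.map Prod.fst) := by
      rw [List.map_cons, ← hsplit, List.map_append]
      exact pvOfList_group pid _ _
        (fun i hi => by obtain ⟨p, hp, hpi⟩ := List.mem_map.mp hi; exact hpi ▸ hgrpid p hp)
        (fun hmem => by obtain ⟨p, hp, hpi⟩ := List.mem_map.mp hmem; exact hne p hp hpi)
    -- tail ids filter like rest'
    have htail : ∀ id ∈ PySem.Set.ofList (rest'.map Prod.fst),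
        ((pid, m) :: rest).filter (fun p => p.1 == id) = rest'.filter (fun p => p.1 == id) := by
      intro id hid
      have hidne : id ≠ pid := by
        rw [PySem.Set.mem_ofList] at hid
        obtain ⟨p, hp, hpi⟩ := List.mem_map.mp hid
        exact hpi ▸ hne p hp
      rw [List.filter_cons_of_neg (by simpa using Ne.symm hidne), ← hsplit,
        List.filter_append,
        List.filter_eq_nil_iff.mpr (fun a ha => by simp [hgrpid a ha, Ne.symm hidne]),
        List.nil_append]
    -- assemble
    unfold pvNA
    rw [hids, List.map_cons]
    congr 1
    · exact hcnt.symm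
    · rw [List.map_congr_left (fun id hid => by rw [htail id hid])]
      exact ih hrest'_pl

-- pvNA only depends on the multiset of logs (up to permutation)
theorem pvOfList_perm {xs ys : List Int} (h : xs.Perm ys) :
    (PySem.Set.ofList xs).Perm (PySem.Set.ofList ys) := by
  rw [List.perm_ext_iff_of_nodup (PySem.Set.nodup_ofList xs) (PySem.Set.nodup_ofList ys)]
  intro a
  rw [PySem.Set.mem_ofList, PySem.Set.mem_ofList]
  exact ⟨fun hx => h.mem_iff.mp hx, fun hy => h.mem_iff.mpr hy⟩

theorem pvNA_perm {l l' : List (Int × Int)} (h : l.Perm l') : (pvNA l).Perm (pvNA l') := by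
  unfold pvNA
  have hids : (PySem.Set.ofList (l.map Prod.fst)).Perm (PySem.Set.ofList (l'.map Prod.fst)) :=
    pvOfList_perm (h.map Prod.fst)
  have hfun : ∀ id : Int,
      ((PySem.Set.ofList ((l.filter (fun p => p.1 == id)).map Prod.snd)).length : Int)
      = ((PySem.Set.ofList ((l'.filter (fun p => p.1 == id)).map Prod.snd)).length : Int) := by
    intro id
    have := pvOfList_perm ((h.filter (fun p => p.1 == id)).map Prod.snd)
    rw [this.length_eq]
  rw [List.map_congr_left (fun id _ => hfun id)]
  exact hids.map _

-- reading an index untouched by a set is unchanged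
theorem pvGetD_set_ne (xs : List Int) (i : Int) (hi : 0 ≤ i) (j : Nat) (v d : Int)
    (hij : i.toNat ≠ j) :
    PySem.List.pyGetD (xs.set j v) i d = PySem.List.pyGetD xs i d := by
  have hget : PySem.List.pyGet? (xs.set j v) i = PySem.List.pyGet? xs i := by
    unfold PySem.List.pyGet? PySem.List.pyIdx?
    rw [List.length_set]
    split_ifs with h1
    · simp only [Option.bind_some]
      exact List.getElem?_set_ne (Ne.symm hij)
    · rfl
  simp only [PySem.List.pyGetD, hget]

-- the bump operation is right-commutative, so the fold is permutation-invariant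
theorem pvBump_comm (k : Int) (ans : List Int) (a b : Int) :
    pvBump k (pvBump k ans a) b = pvBump k (pvBump k ans b) a := by
  by_cases ha : 1 ≤ a ∧ a ≤ k
  · by_cases hb : 1 ≤ b ∧ b ≤ k
    · by_cases hab : a = b
      · subst hab; rfl
      · have hia : (0:Int) ≤ a - 1 := by omega
        have hib : (0:Int) ≤ b - 1 := by omega
        have hne : (a - 1).toNat ≠ (b - 1).toNat := by omega
        simp only [pvBump, if_pos ha, if_pos hb,
          PySem.List.pySetD_of_nonneg _ _ hia, PySem.List.pySetD_of_nonneg _ _ hib]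
        rw [pvGetD_set_ne ans (a - 1) hia _ _ _ hne,
          pvGetD_set_ne ans (b - 1) hib _ _ _ (Ne.symm hne),
          List.set_comm _ _ hne]
    · simp only [pvBump, if_neg hb]
  · simp only [pvBump, if_neg ha]

-- A's dict of sets, in closed form
theorem pvKeys_insert_add {κ ν : Type} [BEq κ] [LawfulBEq κ] (d : PySem.Dict κ ν) (k : κ) (v : ν) :
    (d.insert k v).keys = PySem.Set.add d.keys k := by
  by_cases h : d.contains k = true
  · rw [PySem.Dict.keys_insert_of_contains _ v h,
      PySem.Set.add_of_mem ((PySem.Dict.contains_iff_mem_keys _ _).mp h)]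
  · rw [PySem.Dict.keys_insert_of_not_contains _ v (by simpa using h),
      PySem.Set.add_of_not_mem (fun hm => h ((PySem.Dict.contains_iff_mem_keys _ _).mpr hm))]

theorem pvDictA_items (logs : List (Int × Int)) (d : PySem.Dict Int (PySem.Set Int))
    (hnd : d.keys.Nodup) :
    (logs.foldl (fun d p => d.modify p.1 PySem.Set.empty (fun s => PySem.Set.add s p.2)) d).items
    = (PySem.Set.update d.keys (logs.map Prod.fst)).map
        (fun id => (id, PySem.Set.update (d.getD id PySem.Set.empty)
          ((logs.filter (fun p => p.1 == id)).map Prod.snd))) := by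
  induction logs generalizing d with
  | nil =>
      simp [PySem.Set.update_nil, PySem.Dict.items_eq_map_keys d hnd PySem.Set.empty]
  | cons p rest ih =>
      have hnd' : (d.modify p.1 PySem.Set.empty (fun s => PySem.Set.add s p.2)).keys.Nodup := by
        rw [PySem.Dict.keys_modify, pvKeys_insert_add]
        exact PySem.Set.nodup_add _ _ hnd
      rw [List.foldl_cons, ih _ hnd', PySem.Dict.keys_modify, pvKeys_insert_add,
        List.map_cons, PySem.Set.update_cons]
      congr 1
      funext id
      by_cases h : id = p.1
      · subst h
        simp [PySem.Dict.getD_modify_self, PySem.Set.update_cons]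
      · have hb : (p.1 == id) = false := by simp [Ne.symm h]
        rw [PySem.Dict.getD_modify_of_ne _ _ _ h]
        simp [hb]

-- A's n-sequence is pvNA
theorem pvA_foldl (logs : List (Int × Int)) (k : Int) (ans : List Int) :
    ((logs.foldl (fun d p => d.modify p.1 PySem.Set.empty (fun s => PySem.Set.add s p.2))
        (PySem.Dict.empty : PySem.Dict Int (PySem.Set Int))).items).foldl
      (fun ans it => pvBump k ans (PySem.Set.len it.2)) ans
    = List.foldl (pvBump k) ans (pvNA logs) := by
  rw [pvDictA_items logs PySem.Dict.empty (by simp [PySem.Dict.keys_empty])]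
  simp only [PySem.Dict.keys_empty, PySem.Dict.getD_empty, PySem.Set.empty,
    PySem.Set.update_nil_left]
  unfold pvNA
  rw [List.foldl_map, List.foldl_map]
  rfl

-- ===== VERDICT (by name: the statement is the Claim_ definition above) =====
theorem counting_pirates_action_minutes_spec : Claim_equal_counting_pirates_action_minutes := by
  intro logs k _
  unfold Spec_counting_pirates_action_minutes
  simp only [counting_pirates_action_minutes, counting_pirates_action_minutes_alt]
  rw [pvA_foldl, pvSweep_foldl, pvRuns_eq_NA _ (pvSorted2_pairwise logs)]
  haveI : RightCommutative (pvBump k) := ⟨fun ans a b => pvBump_comm k ans a b⟩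
  exact ((pvNA_perm (PySem.List.sorted2_perm logs Prod.fst Prod.snd false)).foldl_eq _).symm
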